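-- pv_equiv track=rewrite | github.com/JeanBaptisteServais/unsupervised-learning | fp_growth/main.py | first_step_conditional_pattern_base
-- ===== SOURCE A (Python) =====
-- def first_step_conditional_pattern_base(dico):
--     """Regroup roads with finish node score"""
--
--     # Dictionnary whose key's the endpoint and which has the value of routes.
--     conditional_pattern_base = {k: [] for (k, score), v in dico.items()}
--
--     # Recuperate endpoint: road
--     for (endpoint, score), routes in dico.items():
--         [conditional_pattern_base[endpoint].append(([node for (node, _) in road], score)) for road in routes]
--
--     # Recovery the node without his scorage.
--     data = []
--     for endpoint, routes in conditional_pattern_base.items():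
--         d = {road[0]: [] for (road, score) in routes}
--         [d[road[0]].append((road, score)) for (road, score) in routes]
--         data += [{endpoint: d}]
--
--     return data
-- ===== SOURCE B (Python) =====
-- def first_step_conditional_pattern_base(dico):
--     """Regroup roads with finish node score, declaratively: flatten the input to
--     (endpoint, node_list, score) triples once, then build the whole nested result
--     by comprehensions that filter the triples per endpoint / per first node,
--     with dict.fromkeys giving each key level in first-appearance order."""
--     triples = [(endpoint, [node for (node, _) in road], score)
--                for (endpoint, score), routes in dico.items()
--                for road in routes]
--     return [{endpoint:
--                  {head: [(nl, s) for (e, nl, s) in triples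
--                          if e == endpoint and nl[0] == head]
--                   for head in dict.fromkeys(
--                       nl[0] for (e, nl, _s) in triples if e == endpoint)}}
--             for endpoint in dict.fromkeys(e for (e, _s) in dico)]
-- ===== Notes on version B (the rewrite author's own statement) =====
-- stated objective: alternative
-- what changed: A builds the grouping by mutating dictionaries across three sequential passes (seed an endpoint table, append every road into it, then re-scan each endpoint's list to regroup by first node); B never mutates a grouping dict: it flattens the input once into (endpoint, node_list, score) triples and constructs the whole nested result declaratively by comprehensions that filter the triples per endpoint and per first node, with dict.fromkeys supplying each key level in first-appearance order.
-- outside the precondition, e.g. on first_step_conditional_pattern_base({('a', 1): [[]]}): A raises IndexError, B raises IndexError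
import Mathlib
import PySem

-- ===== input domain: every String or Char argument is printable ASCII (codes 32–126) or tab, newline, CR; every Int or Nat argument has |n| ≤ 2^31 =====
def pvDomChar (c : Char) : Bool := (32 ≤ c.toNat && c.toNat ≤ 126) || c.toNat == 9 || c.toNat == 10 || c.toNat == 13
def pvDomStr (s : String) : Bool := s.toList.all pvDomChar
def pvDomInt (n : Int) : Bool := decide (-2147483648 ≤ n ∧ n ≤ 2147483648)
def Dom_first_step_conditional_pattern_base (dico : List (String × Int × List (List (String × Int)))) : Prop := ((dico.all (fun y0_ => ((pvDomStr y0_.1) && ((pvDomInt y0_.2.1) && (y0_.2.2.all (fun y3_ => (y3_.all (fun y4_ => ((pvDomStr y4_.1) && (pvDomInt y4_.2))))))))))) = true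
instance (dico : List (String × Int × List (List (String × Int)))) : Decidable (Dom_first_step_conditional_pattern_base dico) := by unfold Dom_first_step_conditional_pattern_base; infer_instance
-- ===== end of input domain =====

-- B replaces A's three dict-mutating passes (seed an endpoint table, append every road into it,
-- re-scan each endpoint's list to regroup by first node) with a declarative construction:
-- flatten once to (endpoint, node_list, score) triples, then build the nested result by
-- comprehensions filtering the triples per endpoint / per first node; objective: alternative.

-- road[0] / nl[0]: Python raises IndexError on an empty road; those inputs are excluded by
-- Pre_, so the "" default is never reached there
def pvFirst (xs : List String) : String := (PySem.List.pyGet? xs 0).getD ""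

-- ===== PORT A =====
def first_step_conditional_pattern_base (dico : List (String × Int × List (List (String × Int)))) : List (List (String × List (String × List (List String × Int)))) :=
  -- conditional_pattern_base = {k: [] for (k, score), v in dico.items()}
  let cpb0 : PySem.Dict String (List (List String × Int)) :=
    dico.foldl (fun d e => d.insert e.1 []) PySem.Dict.empty
  -- for (endpoint, score), routes: [cpb[endpoint].append(([node for (node,_) in road], score)) for road in routes]
  -- (endpoint is always a key of cpb0, so modify's default [] is never consulted)
  let cpb : PySem.Dict String (List (List String × Int)) :=
    dico.foldl (fun d e =>
      e.2.2.foldl (fun d road => d.modify e.1 [] (fun l => l ++ [(road.map Prod.fst, e.2.1)])) d) cpb0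
  -- data loop: d = {road[0]: [] for ...}; fill; data += [{endpoint: d}]
  cpb.items.foldl (fun data p =>
    let d0 : PySem.Dict String (List (List String × Int)) :=
      p.2.foldl (fun d rs => d.insert (pvFirst rs.1) []) PySem.Dict.empty
    let d : PySem.Dict String (List (List String × Int)) :=
      p.2.foldl (fun d rs => d.modify (pvFirst rs.1) [] (fun l => l ++ [rs])) d0
    data ++ [[(p.1, d.items)]]) []

-- ===== PORT B =====
def first_step_conditional_pattern_base_alt (dico : List (String × Int × List (List (String × Int)))) : List (List (String × List (String × List (List String × Int)))) :=
  -- triples = [(endpoint, [node for (node,_) in road], score) for (endpoint, score), routes in dico.items() for road in routes]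
  let triples : List (String × List String × Int) :=
    dico.flatMap (fun e => e.2.2.map (fun road => (e.1, road.map Prod.fst, e.2.1)))
  -- [{endpoint: {head: [...] for head in dict.fromkeys(...)}} for endpoint in dict.fromkeys(...)]
  (PySem.List.dedup (dico.map (fun e => e.1))).map (fun endpoint =>
    [(endpoint,
      (PySem.List.dedup ((triples.filter (fun t => t.1 == endpoint)).map (fun t => pvFirst t.2.1))).map
        (fun head =>
          (head, (triples.filter (fun t => t.1 == endpoint && pvFirst t.2.1 == head)).map
            (fun t => (t.2.1, t.2.2)))))])

-- ===== PRECONDITION & SPEC =====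
-- Pre_ excludes (a) inputs containing an empty road, on which A raises IndexError at road[0], and
-- (b) association lists with duplicate (endpoint, score) keys, which do not represent any Python dict.
def Pre_first_step_conditional_pattern_base (dico : List (String × Int × List (List (String × Int)))) : Prop :=
  (∀ e ∈ dico, ∀ road ∈ e.2.2, road ≠ []) ∧ (dico.map (fun e => (e.1, e.2.1))).Nodup
instance (dico : List (String × Int × List (List (String × Int)))) : Decidable (Pre_first_step_conditional_pattern_base dico) := by unfold Pre_first_step_conditional_pattern_base; infer_instance

def pvWitness_first_step_conditional_pattern_base : (List (String × Int × List (List (String × Int)))) :=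
  [("a", 1, [[("x", 1)], [("y", 2), ("x", 1)]]), ("b", 2, [[("x", 3)]])]

def Spec_first_step_conditional_pattern_base (dico : List (String × Int × List (List (String × Int)))) (out : List (List (String × List (String × List (List String × Int))))) : Prop := out = first_step_conditional_pattern_base_alt dico
instance (dico : List (String × Int × List (List (String × Int)))) (out : List (List (String × List (String × List (List String × Int))))) : Decidable (Spec_first_step_conditional_pattern_base dico out) := by
  unfold Spec_first_step_conditional_pattern_base
  haveI h3 : DecidableEq (List (String × List (List String × Int))) := inferInstance
  haveI h4 : DecidableEq (String × List (String × List (List String × Int))) := inferInstance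
  haveI h5 : DecidableEq (List (String × List (String × List (List String × Int)))) := inferInstance
  haveI h6 : DecidableEq (List (List (String × List (String × List (List String × Int))))) := inferInstance
  exact h6 _ _

-- ===== CLAIM (what is proved, stated in full; the proofs are below) =====
def Claim_equal_first_step_conditional_pattern_base : Prop := ∀ (dico : List (String × Int × List (List (String × Int)))), Dom_first_step_conditional_pattern_base dico → Pre_first_step_conditional_pattern_base dico → Spec_first_step_conditional_pattern_base dico (first_step_conditional_pattern_base dico)

-- ===== LEMMAS AND PROOFS =====

-- updating a set with elements it already contains changes nothing
theorem pv_update_of_subset (s : PySem.Set String) (xs : List String)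
    (h : ∀ x ∈ xs, x ∈ s) : PySem.Set.update s xs = s := by
  rw [PySem.Set.update_eq_append_filter]
  have hf : (PySem.Set.ofList xs).filter (fun y => !s.contains y) = [] := by
    apply List.filter_eq_nil_iff.mpr
    intro y hy
    simp [PySem.Set.contains, h y ((PySem.Set.mem_ofList xs y).mp hy)]
  rw [hf, List.append_nil]

-- a seed dict built by inserting [] everywhere looks up to [] at every key
theorem pv_seed_getD {α : Type} (ks : List String) (d : PySem.Dict String (List α))
    (h : ∀ k, d.getD k [] = []) (k : String) :
    (ks.foldl (fun d k' => d.insert k' ([] : List α)) d).getD k [] = [] := by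
  induction ks generalizing d with
  | nil => simpa using h k
  | cons x t ih =>
    simp only [List.foldl_cons]
    apply ih
    intro k'
    rw [PySem.Dict.getD_insert]
    split <;> simp [h]

-- items of a seed-then-append grouping dict: first-occurrence keys with filtered value lists
theorem pv_group_items {α : Type} (ks : List String) (l : List (String × α))
    (hsub : ∀ p ∈ l, p.1 ∈ ks) :
    (l.foldl (fun d p => d.modify p.1 [] (fun v => v ++ [p.2]))
      (ks.foldl (fun d k => d.insert k ([] : List α)) PySem.Dict.empty)).items
      = (PySem.Set.ofList ks).map (fun k => (k, (l.filter (fun p => p.1 == k)).map Prod.snd)) := by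
  have hseedsnd : (ks.foldl (fun d k => d.insert k ([] : List α)) PySem.Dict.empty).keys.Nodup :=
    PySem.Dict.nodup_keys_foldl_insert ks (fun _ _ => []) _ PySem.Dict.nodup_keys_empty
  have hseedkeys : (ks.foldl (fun d k => d.insert k ([] : List α)) PySem.Dict.empty).keys
      = PySem.Set.ofList ks := by
    rw [PySem.Dict.keys_foldl_insert ks (fun _ _ => [])]
    simp [PySem.Set.update_nil_left]
  have hnd := PySem.Dict.nodup_keys_foldl_modify_key l Prod.fst [] (fun _ p v => v ++ [p.2]) _ hseedsnd
  have hkeys : (l.foldl (fun d p => d.modify p.1 [] (fun v => v ++ [p.2]))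
      (ks.foldl (fun d k => d.insert k ([] : List α)) PySem.Dict.empty)).keys
      = PySem.Set.ofList ks := by
    rw [PySem.Dict.keys_foldl_modify_key l Prod.fst [] (fun _ p v => v ++ [p.2]), hseedkeys]
    apply pv_update_of_subset
    intro x hx
    rcases List.mem_map.mp hx with ⟨p, hp, rfl⟩
    exact (PySem.Set.mem_ofList ks p.1).mpr (hsub p hp)
  rw [PySem.Dict.items_eq_map_keys _ hnd [], hkeys]
  apply List.map_congr_left
  intro k _
  rw [PySem.Dict.getD_foldl_modify_append, pv_seed_getD ks PySem.Dict.empty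
    (fun k' => PySem.Dict.getD_empty k' []) k, List.nil_append]

-- A's inner per-endpoint regrouping (seed by first node, then fill) as a filter map
theorem pv_inner (rs : List (List String × Int)) :
    (rs.foldl (fun d x => d.modify (pvFirst x.1) [] (fun l => l ++ [x]))
      (rs.foldl (fun d x => d.insert (pvFirst x.1) []) PySem.Dict.empty)).items
      = (PySem.Set.ofList (rs.map (fun x => pvFirst x.1))).map
          (fun h => (h, rs.filter (fun x => pvFirst x.1 == h))) := by
  have hseed : rs.foldl (fun d x => d.insert (pvFirst x.1) ([] : List (List String × Int))) PySem.Dict.empty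
      = (rs.map (fun x => pvFirst x.1)).foldl (fun d k => d.insert k []) PySem.Dict.empty :=
    (List.foldl_map (f := fun x : List String × Int => pvFirst x.1)
      (g := fun (d : PySem.Dict String (List (List String × Int))) (k : String) => d.insert k [])
      (l := rs) (init := PySem.Dict.empty)).symm
  have hfill : ∀ d : PySem.Dict String (List (List String × Int)),
      rs.foldl (fun d x => d.modify (pvFirst x.1) [] (fun l => l ++ [x])) d
        = (rs.map (fun x => (pvFirst x.1, x))).foldl (fun d p => d.modify p.1 [] (fun v => v ++ [p.2])) d :=
    fun d => (List.foldl_map (f := fun x : List String × Int => (pvFirst x.1, x))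
      (g := fun (d : PySem.Dict String (List (List String × Int))) (p : String × (List String × Int)) =>
        d.modify p.1 [] (fun v => v ++ [p.2])) (l := rs) (init := d)).symm
  rw [hseed, hfill, pv_group_items (rs.map (fun x => pvFirst x.1)) (rs.map (fun x => (pvFirst x.1, x)))
    (by intro p hp; rcases List.mem_map.mp hp with ⟨x, hx, rfl⟩; exact List.mem_map.mpr ⟨x, hx, rfl⟩)]
  apply List.map_congr_left
  intro h _
  rw [List.filter_map, List.map_map]
  simp [Function.comp_def]

-- A's outer dict (seed from the endpoints, fill from the nested routes loop) as a filter map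
theorem pv_cpb_items (dico : List (String × Int × List (List (String × Int)))) :
    (dico.foldl (fun d e =>
        e.2.2.foldl (fun d road => d.modify e.1 [] (fun l => l ++ [(road.map Prod.fst, e.2.1)])) d)
      (dico.foldl (fun d e => d.insert e.1 []) PySem.Dict.empty)).items
      = (PySem.Set.ofList (dico.map (fun e => e.1))).map
          (fun k => (k, ((dico.flatMap (fun e => e.2.2.map (fun road => (e.1, road.map Prod.fst, e.2.1)))).filter
              (fun p => p.1 == k)).map Prod.snd)) := by
  have hfill : ∀ init : PySem.Dict String (List (List String × Int)),
      dico.foldl (fun d e =>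
          e.2.2.foldl (fun d road => d.modify e.1 [] (fun l => l ++ [(road.map Prod.fst, e.2.1)])) d) init
        = (dico.flatMap (fun e => e.2.2.map (fun road => ((e.1 : String), (road.map Prod.fst, e.2.1))))).foldl
            (fun d p => d.modify p.1 [] (fun v => v ++ [p.2])) init := by
    induction dico with
    | nil => intro init; rfl
    | cons e t ih =>
      intro init
      simp only [List.foldl_cons, List.flatMap_cons, List.foldl_append, List.foldl_map]
      apply ih
  have hseed : dico.foldl (fun d e => d.insert e.1 ([] : List (List String × Int))) PySem.Dict.empty
      = (dico.map (fun e => e.1)).foldl (fun d k => d.insert k []) PySem.Dict.empty :=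
    (List.foldl_map (f := fun e : String × Int × List (List (String × Int)) => e.1)
      (g := fun (d : PySem.Dict String (List (List String × Int))) (k : String) => d.insert k [])
      (l := dico) (init := PySem.Dict.empty)).symm
  rw [hseed, hfill]
  apply pv_group_items
  intro p hp
  rcases List.mem_flatMap.mp hp with ⟨e, he, hpe⟩
  rcases List.mem_map.mp hpe with ⟨road, _, rfl⟩
  exact List.mem_map.mpr ⟨e, he, rfl⟩

-- ===== VERDICT (by name: the statement is the Claim_ definition above) =====
theorem first_step_conditional_pattern_base_spec : Claim_equal_first_step_conditional_pattern_base := by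
  intro dico _ _
  unfold Spec_first_step_conditional_pattern_base
  simp only [first_step_conditional_pattern_base, first_step_conditional_pattern_base_alt]
  rw [pv_cpb_items, PySem.List.foldl_append_singleton_eq_map, List.nil_append, List.map_map]
  simp only [PySem.List.dedup_eq_ofList]
  apply List.map_congr_left
  intro k _
  simp only [Function.comp_def, pv_inner]
  refine congrArg (fun z => [(k, z)]) ?_
  rw [List.map_map]
  simp only [Function.comp_def]
  apply List.map_congr_left
  intro h _
  refine congrArg (fun z => (h, z)) ?_
  rw [List.filter_map, List.filter_filter]
  simp only [Function.comp_def]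
  exact congrArg (List.map Prod.snd) (List.filter_congr (fun t _ => by rw [Bool.and_comm]))
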